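-- pv_equiv track=rewrite | github.com/jsoyer/cv-pipeline | scripts/render.py | render_languages_interests
-- ===== SOURCE A (Python) =====
-- def escape_latex(text):
--     """Escape LaTeX special characters in plain text."""
--     text = text.replace("\\", "\\textbackslash{}")
--     text = text.replace("&", "\\&")
--     text = text.replace("%", "\\%")
--     text = text.replace("$", "\\$")
--     text = text.replace("#", "\\#")
--     text = text.replace("_", "\\_")
--     text = text.replace("~", "\\textasciitilde{}")
--     text = text.replace("^", "\\textasciicircum{}")
--     return text
--
-- def render_languages_interests(languages, interests):
--     lines = [
--         "\\cvsection{Languages \\& Interests}",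
--         "",
--         "\\begin{cvskills}",
--         "",
--         "\\cvskill",
--         "  {Languages}",
--         f"  {{{', '.join(escape_latex(l) for l in languages)}}}",
--         "",
--         "\\cvskill",
--         "  {Interests}",
--         f"  {{{', '.join(escape_latex(i) for i in interests)}}}",
--         "",
--         "\\end{cvskills}",
--     ]
--     return "\n".join(lines)
-- ===== SOURCE B (Python) =====
-- _LATEX = {
--     "\\": "\\textbackslash{}",
--     "&": "\\&",
--     "%": "\\%",
--     "$": "\\$",
--     "#": "\\#",
--     "_": "\\_",
--     "~": "\\textasciitilde{}",
--     "^": "\\textasciicircum{}",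
-- }
--
-- def escape_latex(text):
--     """Escape LaTeX special characters in one pass over the text."""
--     return "".join(_LATEX.get(c, c) for c in text)
--
-- def render_languages_interests(languages, interests):
--     lines = [
--         "\\cvsection{Languages \\& Interests}",
--         "",
--         "\\begin{cvskills}",
--         "",
--         "\\cvskill",
--         "  {Languages}",
--         f"  {{{', '.join(escape_latex(l) for l in languages)}}}",
--         "",
--         "\\cvskill",
--         "  {Interests}",
--         f"  {{{', '.join(escape_latex(i) for i in interests)}}}",
--         "",
--         "\\end{cvskills}",
--     ]
--     return "\n".join(lines)
-- ===== Notes on version B (the rewrite author's own statement) =====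
-- stated objective: alternative
-- what changed: escape_latex is rewritten from eight sequential full-string .replace passes into a single character scan over the text with a lookup table of LaTeX escapes, joined once.
import Mathlib
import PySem

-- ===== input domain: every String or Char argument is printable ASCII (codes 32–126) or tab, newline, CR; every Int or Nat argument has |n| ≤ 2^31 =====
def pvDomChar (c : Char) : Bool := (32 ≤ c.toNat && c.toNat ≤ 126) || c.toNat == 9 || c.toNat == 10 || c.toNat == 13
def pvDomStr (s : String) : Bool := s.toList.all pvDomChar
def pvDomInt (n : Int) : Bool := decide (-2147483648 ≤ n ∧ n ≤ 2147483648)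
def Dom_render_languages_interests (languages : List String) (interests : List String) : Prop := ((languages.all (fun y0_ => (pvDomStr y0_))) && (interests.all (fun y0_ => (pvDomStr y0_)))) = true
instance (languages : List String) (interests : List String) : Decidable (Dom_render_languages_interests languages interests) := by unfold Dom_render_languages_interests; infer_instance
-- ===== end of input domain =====

-- ===== PORT A =====
-- B replaces escape_latex's eight sequential full-string replace passes by one
-- character scan with a lookup table; render_languages_interests keeps its shape.
def escape_latex (text : String) : String :=
  let text := PySem.Str.replace text "\\" "\\textbackslash{}"
  let text := PySem.Str.replace text "&" "\\&"
  let text := PySem.Str.replace text "%" "\\%"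
  let text := PySem.Str.replace text "$" "\\$"
  let text := PySem.Str.replace text "#" "\\#"
  let text := PySem.Str.replace text "_" "\\_"
  let text := PySem.Str.replace text "~" "\\textasciitilde{}"
  let text := PySem.Str.replace text "^" "\\textasciicircum{}"
  text

def render_languages_interests (languages : List String) (interests : List String) : String :=
  let lines : List String := [
    "\\cvsection{Languages \\& Interests}",
    "",
    "\\begin{cvskills}",
    "",
    "\\cvskill",
    "  {Languages}",
    "  {" ++ PySem.Str.join ", " (languages.map escape_latex) ++ "}",
    "",
    "\\cvskill",
    "  {Interests}",
    "  {" ++ PySem.Str.join ", " (interests.map escape_latex) ++ "}",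
    "",
    "\\end{cvskills}"]
  PySem.Str.join "\n" lines

-- ===== PORT B =====
def latexMap : PySem.Dict Char String := PySem.Dict.mk [
  ('\\', "\\textbackslash{}"),
  ('&', "\\&"),
  ('%', "\\%"),
  ('$', "\\$"),
  ('#', "\\#"),
  ('_', "\\_"),
  ('~', "\\textasciitilde{}"),
  ('^', "\\textasciicircum{}")]

def escape_latex_alt (text : String) : String :=
  PySem.Str.join "" (text.toList.map (fun c => latexMap.getD c (String.ofList [c])))

def render_languages_interests_alt (languages : List String) (interests : List String) : String :=
  let lines : List String := [
    "\\cvsection{Languages \\& Interests}",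
    "",
    "\\begin{cvskills}",
    "",
    "\\cvskill",
    "  {Languages}",
    "  {" ++ PySem.Str.join ", " (languages.map escape_latex_alt) ++ "}",
    "",
    "\\cvskill",
    "  {Interests}",
    "  {" ++ PySem.Str.join ", " (interests.map escape_latex_alt) ++ "}",
    "",
    "\\end{cvskills}"]
  PySem.Str.join "\n" lines

-- ===== PRECONDITION & SPEC =====
def Spec_render_languages_interests (languages : List String) (interests : List String) (out : String) : Prop := out = render_languages_interests_alt languages interests
instance (languages : List String) (interests : List String) (out : String) : Decidable (Spec_render_languages_interests languages interests out) := by unfold Spec_render_languages_interests; infer_instance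

-- ===== CLAIM (what is proved, stated in full; the proofs are below) =====
def Claim_equal_render_languages_interests : Prop := ∀ (languages : List String) (interests : List String), Dom_render_languages_interests languages interests → Spec_render_languages_interests languages interests (render_languages_interests languages interests)

-- ===== LEMMAS AND PROOFS =====

lemma go_single (c : Char) (new : List Char) :
    ∀ (l : List Char) (fuel : Nat) (acc : List Char), l.length ≤ fuel →
      PySem.Chars.replace.go [c] new fuel l acc
        = acc.reverse ++ l.flatMap (fun x => if x = c then new else [x]) := by
  intro l
  induction l with
  | nil =>
    intro fuel acc _
    cases fuel <;> simp [PySem.Chars.replace.go]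
  | cons x t ih =>
    intro fuel acc h
    cases fuel with
    | zero => simp at h
    | succ n =>
      by_cases hx : x = c
      · subst hx
        rw [PySem.Chars.replace.go]
        simp only [List.isPrefixOf, BEq.rfl, Bool.true_and, if_true,
          List.length_singleton, List.drop_one, List.tail_cons]
        rw [ih n (new.reverse ++ acc) (by simpa using Nat.le_of_succ_le_succ h)]
        simp
      · rw [PySem.Chars.replace.go]
        have : [c].isPrefixOf (x :: t) = false := by
          simp [List.isPrefixOf]
          exact fun hcx => hx hcx.symm
        rw [this]
        simp only [if_false, Bool.false_eq_true]
        rw [ih n (x :: acc) (by simpa using Nat.le_of_succ_le_succ h)]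
        simp [hx]

lemma replace_single (cs new : List Char) (c : Char) :
    PySem.Chars.replace cs [c] new = cs.flatMap (fun x => if x = c then new else [x]) := by
  rw [PySem.Chars.replace]
  simp only [List.isEmpty_cons, Bool.false_eq_true, if_false]
  exact go_single c new cs cs.length [] (le_refl _)

-- the single-pass escape rule B's table computes, written per character
def escRule (c : Char) : List Char :=
  (if c = '\\' then "\\textbackslash{}".toList else [c]).flatMap fun x =>
  (if x = '&' then "\\&".toList else [x]).flatMap fun x =>
  (if x = '%' then "\\%".toList else [x]).flatMap fun x =>
  (if x = '$' then "\\$".toList else [x]).flatMap fun x =>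
  (if x = '#' then "\\#".toList else [x]).flatMap fun x =>
  (if x = '_' then "\\_".toList else [x]).flatMap fun x =>
  (if x = '~' then "\\textasciitilde{}".toList else [x]).flatMap fun x =>
  (if x = '^' then "\\textasciicircum{}".toList else [x])

lemma escRule_eq_table (c : Char) :
    escRule c = (latexMap.getD c (String.ofList [c])).toList := by
  by_cases h1 : c = '\\'; · subst h1; decide
  by_cases h2 : c = '&'; · subst h2; decide
  by_cases h3 : c = '%'; · subst h3; decide
  by_cases h4 : c = '$'; · subst h4; decide
  by_cases h5 : c = '#'; · subst h5; decide
  by_cases h6 : c = '_'; · subst h6; decide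
  by_cases h7 : c = '~'; · subst h7; decide
  by_cases h8 : c = '^'; · subst h8; decide
  have b1 : ('\\' == c) = false := beq_eq_false_iff_ne.mpr (Ne.symm h1)
  have b2 : ('&' == c) = false := beq_eq_false_iff_ne.mpr (Ne.symm h2)
  have b3 : ('%' == c) = false := beq_eq_false_iff_ne.mpr (Ne.symm h3)
  have b4 : ('$' == c) = false := beq_eq_false_iff_ne.mpr (Ne.symm h4)
  have b5 : ('#' == c) = false := beq_eq_false_iff_ne.mpr (Ne.symm h5)
  have b6 : ('_' == c) = false := beq_eq_false_iff_ne.mpr (Ne.symm h6)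
  have b7 : ('~' == c) = false := beq_eq_false_iff_ne.mpr (Ne.symm h7)
  have b8 : ('^' == c) = false := beq_eq_false_iff_ne.mpr (Ne.symm h8)
  simp [escRule, latexMap, PySem.Dict.getD, PySem.Dict.get?, List.find?,
    b1, b2, b3, b4, b5, b6, b7, b8, h1, h2, h3, h4, h5, h6, h7, h8]

lemma join_empty_sep : ∀ xss : List (List Char), PySem.Chars.join [] xss = xss.flatten := by
  intro xss
  induction xss with
  | nil => rfl
  | cons x t ih =>
    cases t with
    | nil => simp [PySem.Chars.join, List.intercalate]
    | cons y s =>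
      simp only [PySem.Chars.join, List.intercalate, List.intersperse_cons₂,
        List.flatten_cons] at *
      simp [ih]

set_option maxHeartbeats 1000000 in
lemma esc_eq (s : String) : escape_latex s = escape_latex_alt s := by
  unfold escape_latex escape_latex_alt
  simp only [PySem.Str.replace, PySem.Str.join, String.toList_ofList]
  apply congrArg String.ofList
  rw [show ("\\" : String).toList = ['\\'] from rfl,
    show ("&" : String).toList = ['&'] from rfl,
    show ("%" : String).toList = ['%'] from rfl,
    show ("$" : String).toList = ['$'] from rfl,
    show ("#" : String).toList = ['#'] from rfl,
    show ("_" : String).toList = ['_'] from rfl,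
    show ("~" : String).toList = ['~'] from rfl,
    show ("^" : String).toList = ['^'] from rfl]
  simp only [replace_single, List.flatMap_assoc]
  rw [show ("" : String).toList = [] from rfl, join_empty_sep, List.map_map]
  rw [show (String.toList ∘ fun c => latexMap.getD c (String.ofList [c]))
        = fun c => (latexMap.getD c (String.ofList [c])).toList from rfl]
  rw [← List.flatMap_def]
  show s.toList.flatMap escRule = _
  rw [show escRule = fun c => (latexMap.getD c (String.ofList [c])).toList
        from funext escRule_eq_table]

theorem escape_funext : escape_latex = escape_latex_alt := funext esc_eq

-- ===== VERDICT (by name: the statement is the Claim_ definition above) =====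
theorem render_languages_interests_spec : Claim_equal_render_languages_interests := by
  intro languages interests _
  unfold Spec_render_languages_interests render_languages_interests render_languages_interests_alt
  rw [escape_funext]
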